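-- pv_equiv track=rewrite | github.com/wisoniamir/Genesis-FINAL-TRY | modules/restored/width.py | byteCost
-- ===== SOURCE A (Python) =====
-- from collections import defaultdict
--
-- def byteCost(widths, default, nominal):
--     if not hasattr(widths, "items"):
--         d = defaultdict(int)
--         for w in widths:
--             d[w] += 1
--         widths = d
--
--     cost = 0
--     for w, freq in widths.items():
--         if w == default:
--             continue
--         diff = abs(w - nominal)
--         if diff <= 107:
--             cost += freq
--         elif diff <= 1131:
--             cost += freq * 2
--         else:
--             cost += freq * 5
--     return cost
-- ===== SOURCE B (Python) =====
-- def byteCost(widths, default, nominal):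
--     # Arithmetic decomposition: each non-default width costs
--     # 1 + [|w-nominal| > 107] + 3*[|w-nominal| > 1131]  (= 1, 2 or 5),
--     # so the total is N + F + 3*V computed from three counts.
--     if hasattr(widths, "items"):
--         pairs = [(w, f) for w, f in widths.items() if w != default]
--         n = sum(f for _, f in pairs)
--         far = sum(f for w, f in pairs if abs(w - nominal) > 107)
--         vfar = sum(f for w, f in pairs if abs(w - nominal) > 1131)
--     else:
--         ws = [w for w in widths if w != default]
--         n = len(ws)
--         far = sum(1 for w in ws if abs(w - nominal) > 107)
--         vfar = sum(1 for w in ws if abs(w - nominal) > 1131)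
--     return n + far + 3 * vfar
-- ===== Notes on version B (the rewrite author's own statement) =====
-- stated objective: alternative
-- what changed: Replaces the build-frequency-dict-then-bucket-each-key summation with an arithmetic identity: since each non-default width costs 1 + [deviation>107] + 3*[deviation>1131], B computes three filtered counts (non-default, far, very far) and returns N + F + 3*V, with no frequency table and no per-element cost branching.
import Mathlib
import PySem

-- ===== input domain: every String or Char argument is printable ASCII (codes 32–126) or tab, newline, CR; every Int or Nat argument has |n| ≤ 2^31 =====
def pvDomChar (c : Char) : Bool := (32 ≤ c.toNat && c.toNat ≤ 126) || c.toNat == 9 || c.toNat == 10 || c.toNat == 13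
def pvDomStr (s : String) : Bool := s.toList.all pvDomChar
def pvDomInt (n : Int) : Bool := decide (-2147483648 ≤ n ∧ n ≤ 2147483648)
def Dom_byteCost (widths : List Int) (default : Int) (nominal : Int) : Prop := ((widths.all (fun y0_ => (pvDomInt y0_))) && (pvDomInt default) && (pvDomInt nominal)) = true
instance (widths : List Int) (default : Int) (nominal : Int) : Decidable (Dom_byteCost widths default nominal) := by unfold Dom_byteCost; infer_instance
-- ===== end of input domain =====

-- B replaces A's frequency-dict-then-bucket-per-key summation with an arithmetic identity:
-- total cost = (#non-default) + (#deviation>107) + 3*(#deviation>1131) (objective: alternative).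


-- ===== PORT A =====
-- d = defaultdict(int); for w in widths: d[w] += 1
-- then: for w, freq in d.items(): skip default, bucket |w - nominal| into +freq / +2*freq / +5*freq
def byteCost (widths : List Int) (default : Int) (nominal : Int) : Int :=
  let d : PySem.Dict Int Int :=
    widths.foldl (fun d w => d.modify w 0 (· + 1)) PySem.Dict.empty
  d.items.foldl
    (fun cost p =>
      let w := p.1
      let freq := p.2
      if w = default then cost
      else
        let diff := |w - nominal|
        if diff ≤ 107 then cost + freq
        else if diff ≤ 1131 then cost + freq * 2
        else cost + freq * 5)
    0

-- ===== PORT B =====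
-- ws = [w for w in widths if w != default]; n = len(ws);
-- far = #(|w-nominal| > 107); vfar = #(|w-nominal| > 1131); return n + far + 3*vfar
def byteCost_alt (widths : List Int) (default : Int) (nominal : Int) : Int :=
  let ws := widths.filter (fun w => w ≠ default)
  let n : Int := ws.length
  let far : Int := (ws.filter (fun w => |w - nominal| > 107)).length
  let vfar : Int := (ws.filter (fun w => |w - nominal| > 1131)).length
  n + far + 3 * vfar

-- ===== PRECONDITION & SPEC =====
def Spec_byteCost (widths : List Int) (default : Int) (nominal : Int) (out : Int) : Prop := out = byteCost_alt widths default nominal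
instance (widths : List Int) (default : Int) (nominal : Int) (out : Int) : Decidable (Spec_byteCost widths default nominal out) := by unfold Spec_byteCost; infer_instance

-- ===== CLAIM (what is proved, stated in full; the proofs are below) =====
def Claim_equal_byteCost : Prop := ∀ (widths : List Int) (default : Int) (nominal : Int), Dom_byteCost widths default nominal → Spec_byteCost widths default nominal (byteCost widths default nominal)

-- ===== LEMMAS AND PROOFS =====

-- proof-only helper: the per-width cost A effectively charges
def costOf (default : Int) (nominal : Int) (w : Int) : Int :=
  if w = default then 0
  else
    let diff := |w - nominal|
    if diff ≤ 107 then 1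
    else if diff ≤ 1131 then 2
    else 5

-- A's per-item step adds costOf w * freq to the accumulator.
theorem step_eq_add (default nominal : Int) (cost : Int) (p : Int × Int) :
    (if p.1 = default then cost
     else
       let diff := |p.1 - nominal|
       if diff ≤ 107 then cost + p.2
       else if diff ≤ 1131 then cost + p.2 * 2
       else cost + p.2 * 5)
    = cost + costOf default nominal p.1 * p.2 := by
  simp only [costOf]
  split_ifs <;> ring

-- summing (if a = k then g a else 0) over a list not containing k gives 0
theorem sum_ite_zero (g : Int → Int) (ks : List Int) (k : Int) (hk : k ∉ ks) :
    (ks.map (fun a => if a = k then g a else 0)).sum = 0 := by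
  induction ks with
  | nil => simp
  | cons a as ih =>
    have ha : a ≠ k := fun he => hk (he ▸ List.mem_cons_self)
    simp only [List.map_cons, List.sum_cons, if_neg ha]
    simpa using ih (fun hm => hk (List.mem_cons_of_mem _ hm))

-- summing (if a = k then g a else 0) over a Nodup list containing k gives g k
theorem sum_ite_single (g : Int → Int) (ks : List Int) (x : Int)
    (hnd : ks.Nodup) (hx : x ∈ ks) :
    (ks.map (fun a => if a = x then g a else 0)).sum = g x := by
  induction ks with
  | nil => cases hx
  | cons a as ih =>
    rcases List.mem_cons.mp hx with rfl | h
    · simp only [List.map_cons, List.sum_cons]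
      rw [sum_ite_zero g as x (List.nodup_cons.mp hnd).1]
      simp
    · have ha : a ≠ x := fun he => (List.nodup_cons.mp hnd).1 (he ▸ h)
      simp only [List.map_cons, List.sum_cons, if_neg ha]
      simpa using ih (List.nodup_cons.mp hnd).2 h

-- grouping: summing g over xs equals summing g k * count over any Nodup key list covering xs
theorem sum_group (g : Int → Int) (xs ks : List Int)
    (hnd : ks.Nodup) (hcov : ∀ x ∈ xs, x ∈ ks) :
    (ks.map (fun k => g k * (xs.count k : Int))).sum = (xs.map g).sum := by
  induction xs with
  | nil => simp
  | cons x xs ih =>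
    have hcov' : ∀ y ∈ xs, y ∈ ks := fun y hy => hcov y (List.mem_cons_of_mem _ hy)
    have hsplit :
        (ks.map (fun k => g k * ((x :: xs).count k : Int))).sum
        = (ks.map (fun k => g k * (xs.count k : Int))).sum
          + (ks.map (fun k => if k = x then g k else 0)).sum := by
      rw [← List.sum_map_add]
      refine congrArg List.sum (List.map_congr_left fun k _ => ?_)
      by_cases hkx : k = x
      · subst hkx
        simp [List.count_cons_self]
        ring
      · rw [List.count_cons_of_ne (fun h => hkx h.symm)]
        simp [hkx]
    rw [hsplit, ih hcov', sum_ite_single g ks x hnd (hcov x List.mem_cons_self)]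
    simp [add_comm]

-- A equals the per-element cost sum (via the counter characterisation of its dict loop)
theorem a_eq_sum (widths : List Int) (default nominal : Int) :
    byteCost widths default nominal = (widths.map (costOf default nominal)).sum := by
  show (widths.foldl (fun d w => d.modify w 0 (· + 1)) PySem.Dict.empty).items.foldl
      (fun cost p =>
        if p.1 = default then cost
        else if |p.1 - nominal| ≤ 107 then cost + p.2
        else if |p.1 - nominal| ≤ 1131 then cost + p.2 * 2
        else cost + p.2 * 5) 0
    = (widths.map (costOf default nominal)).sum
  rw [← PySem.Dict.counter_eq_foldl, PySem.Dict.items_counter]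
  have hstep :
      (fun cost (p : Int × Int) =>
        if p.1 = default then cost
        else if |p.1 - nominal| ≤ 107 then cost + p.2
        else if |p.1 - nominal| ≤ 1131 then cost + p.2 * 2
        else cost + p.2 * 5)
      = fun cost p => cost + costOf default nominal p.1 * p.2 := by
    funext cost p
    exact step_eq_add default nominal cost p
  rw [hstep, PySem.List.foldl_add, List.map_map]
  have := sum_group (costOf default nominal) widths (PySem.Set.ofList widths)
      (PySem.Set.nodup_ofList widths) (fun x hx => (PySem.Set.mem_ofList widths x).mpr hx)
  simpa [Function.comp] using this

-- B's cons step adds costOf w (the three counts decompose elementwise)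
theorem alt_cons (w : Int) (ws : List Int) (default nominal : Int) :
    byteCost_alt (w :: ws) default nominal
    = costOf default nominal w + byteCost_alt ws default nominal := by
  simp only [byteCost_alt, costOf, List.filter_cons]
  by_cases hd : w = default
  · simp [hd]
  · simp only [hd, decide_not]
    by_cases h1 : |w - nominal| ≤ 107
    · have h2 : ¬ (107 : Int) < |w - nominal| := not_lt.mpr h1
      have h3 : ¬ (1131 : Int) < |w - nominal| := by omega
      simp [h1, h2, h3]; ring
    · by_cases h2 : |w - nominal| ≤ 1131
      · have h1' : (107 : Int) < |w - nominal| := not_le.mp h1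
        have h3 : ¬ (1131 : Int) < |w - nominal| := not_lt.mpr h2
        simp [h1, h1', h2, h3]; ring
      · have h1' : (107 : Int) < |w - nominal| := not_le.mp h1
        have h2' : (1131 : Int) < |w - nominal| := not_le.mp h2
        simp [h1, h1', h2, h2']; ring

-- the per-element cost sum equals B
theorem sum_eq_alt (widths : List Int) (default nominal : Int) :
    (widths.map (costOf default nominal)).sum = byteCost_alt widths default nominal := by
  induction widths with
  | nil => simp [byteCost_alt]
  | cons w ws ih => rw [List.map_cons, List.sum_cons, alt_cons, ih]

-- ===== VERDICT (by name: the statement is the Claim_ definition above) =====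
theorem byteCost_spec : Claim_equal_byteCost := by
  intro widths default nominal _
  show byteCost widths default nominal = byteCost_alt widths default nominal
  rw [a_eq_sum, sum_eq_alt]
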